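-- pv_equiv track=rewrite | github.com/JBLanier/stratego_env | stratego_env/game/util.py | convert
-- ===== SOURCE A (Python) =====
-- def convert_letter_to_num_left(letter):
--     if letter == 'A':
--         return 0
--     if letter == 'B':
--         return 12
--     elif letter == 'C':
--         return 1
--     elif letter == 'D':
--         return 2
--     elif letter == 'E':
--         return 3
--     elif letter == 'F':
--         return 4
--     elif letter == 'G':
--         return 5
--     elif letter == 'H':
--         return 6
--     elif letter == "I":
--         return 7
--     elif letter == "J":
--         return 8
--     elif letter == "K":
--         return 9
--     elif letter == "L":
--         return 10
--     elif letter == "M":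
--         return 11
--
-- def convert_letter_to_num_right(letter):
--     if letter == 'A':
--         return 0
--     if letter == 'N':
--         return 12
--     elif letter == 'O':
--         return 1
--     elif letter == 'P':
--         return 2
--     elif letter == 'Q':
--         return 3
--     elif letter == 'R':
--         return 4
--     elif letter == 'S':
--         return 5
--     elif letter == 'T':
--         return 6
--     elif letter == "U":
--         return 7
--     elif letter == "V":
--         return 8
--     elif letter == "W":
--         return 9
--     elif letter == "X":
--         return 10
--     elif letter == "Y":
--         return 11
--
-- def convert(game_line, is_left):
--     row = 0
--     arr = []
--     i = 0
--     temp_inner_arr = []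
--     for piece in game_line:
--         if piece == "A":
--             temp_inner_arr.append(0)
--         else:
--             # convert from letters (like in the data) to numbers
--             if is_left:
--                 temp_inner_arr.append(convert_letter_to_num_left(piece))
--             else:
--                 temp_inner_arr.append(convert_letter_to_num_right(piece))
--         i += 1
--         if i % 10 == 0:
--             arr.append(temp_inner_arr)
--             temp_inner_arr = []
--     return arr
-- ===== SOURCE B (Python) =====
-- _LEFT = {'A': 0, 'B': 12, 'C': 1, 'D': 2, 'E': 3, 'F': 4, 'G': 5, 'H': 6,
--          'I': 7, 'J': 8, 'K': 9, 'L': 10, 'M': 11}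
-- _RIGHT = {'A': 0, 'N': 12, 'O': 1, 'P': 2, 'Q': 3, 'R': 4, 'S': 5, 'T': 6,
--           'U': 7, 'V': 8, 'W': 9, 'X': 10, 'Y': 11}
--
-- def convert(game_line, is_left):
--     m = _LEFT if is_left else _RIGHT
--     rows = []
--     while len(game_line) >= 10:
--         rows.append([m[p] for p in game_line[:10]])
--         game_line = game_line[10:]
--     return rows
-- ===== Notes on version B (the rewrite author's own statement) =====
-- stated objective: simpler
-- what changed: Replaces the element-wise counter-and-flush loop (i % 10 bookkeeping, mutable temp row, 13-branch if/elif letter chains) with a dict lookup table and a while loop that repeatedly slices off one complete row of 10 from the front, so only complete rows are ever built.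
import Mathlib
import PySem

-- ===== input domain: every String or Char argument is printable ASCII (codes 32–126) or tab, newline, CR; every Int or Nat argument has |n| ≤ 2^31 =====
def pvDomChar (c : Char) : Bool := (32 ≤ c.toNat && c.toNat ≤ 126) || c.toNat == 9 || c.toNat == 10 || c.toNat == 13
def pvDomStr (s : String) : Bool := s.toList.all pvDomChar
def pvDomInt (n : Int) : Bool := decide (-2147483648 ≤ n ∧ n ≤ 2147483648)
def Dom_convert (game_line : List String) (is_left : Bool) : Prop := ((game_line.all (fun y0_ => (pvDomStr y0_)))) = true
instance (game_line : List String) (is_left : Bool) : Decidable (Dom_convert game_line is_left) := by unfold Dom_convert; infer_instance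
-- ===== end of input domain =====

-- B replaces A's counter-and-flush loop and if/elif letter chains with a lookup dict and a
-- while loop slicing off one complete row of 10 at a time (objective: simpler).

-- ===== PORT A =====
-- fall-through of the Python if/elif chain returns None → Option Int, none exactly there
def convertLetterToNumLeft (letter : String) : Option Int :=
  if letter == "A" then some 0
  else if letter == "B" then some 12
  else if letter == "C" then some 1
  else if letter == "D" then some 2
  else if letter == "E" then some 3
  else if letter == "F" then some 4
  else if letter == "G" then some 5
  else if letter == "H" then some 6
  else if letter == "I" then some 7
  else if letter == "J" then some 8
  else if letter == "K" then some 9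
  else if letter == "L" then some 10
  else if letter == "M" then some 11
  else none

def convertLetterToNumRight (letter : String) : Option Int :=
  if letter == "A" then some 0
  else if letter == "N" then some 12
  else if letter == "O" then some 1
  else if letter == "P" then some 2
  else if letter == "Q" then some 3
  else if letter == "R" then some 4
  else if letter == "S" then some 5
  else if letter == "T" then some 6
  else if letter == "U" then some 7
  else if letter == "V" then some 8
  else if letter == "W" then some 9
  else if letter == "X" then some 10
  else if letter == "Y" then some 11
  else none

-- one iteration of A's for-loop over (arr, temp_inner_arr, i).
-- Where Python would append None (unmapped letter), 0 stands in via getD: under Pre_convert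
-- no such value ever reaches an emitted row (it lives only in the discarded partial temp row).
def convertStep (is_left : Bool) (st : List (List Int) × List Int × Nat) (piece : String) :
    List (List Int) × List Int × Nat :=
  let arr := st.1
  let temp := st.2.1
  let i := st.2.2
  let v : Int := if piece == "A" then 0
    else (if is_left then convertLetterToNumLeft piece else convertLetterToNumRight piece).getD 0
  let temp' := temp ++ [v]
  let i' := i + 1
  if i' % 10 == 0 then (arr ++ [temp'], [], i') else (arr, temp', i')

def convert (game_line : List String) (is_left : Bool) : List (List Int) :=
  (game_line.foldl (convertStep is_left) ([], [], 0)).1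

-- ===== PORT B =====
def leftMap : PySem.Dict String Int := PySem.Dict.ofList
  [("A", 0), ("B", 12), ("C", 1), ("D", 2), ("E", 3), ("F", 4), ("G", 5), ("H", 6),
   ("I", 7), ("J", 8), ("K", 9), ("L", 10), ("M", 11)]

def rightMap : PySem.Dict String Int := PySem.Dict.ofList
  [("A", 0), ("N", 12), ("O", 1), ("P", 2), ("Q", 3), ("R", 4), ("S", 5), ("T", 6),
   ("U", 7), ("V", 8), ("W", 9), ("X", 10), ("Y", 11)]

-- Source B's while loop as structural recursion on the list; m[p] (KeyError on a missing key,
-- excluded by Pre_convert) ported as get? … getD 0.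
def convert_alt (game_line : List String) (is_left : Bool) : List (List Int) :=
  if 10 ≤ game_line.length then
    ((game_line.take 10).map
        (fun p => ((if is_left then leftMap else rightMap).get? p).getD 0))
      :: convert_alt (game_line.drop 10) is_left
  else []
termination_by game_line.length
decreasing_by simp; omega

-- ===== PRECONDITION & SPEC =====
def validKeys (is_left : Bool) : List String :=
  if is_left then ["A", "B", "C", "D", "E", "F", "G", "H", "I", "J", "K", "L", "M"]
  else ["A", "N", "O", "P", "Q", "R", "S", "T", "U", "V", "W", "X", "Y"]

-- Pre_ excludes inputs with an unmapped string among the first ⌊n/10⌋·10 elements: there A's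
-- emitted rows contain None, which is not a value of the declared List[List[int]] type, and B raises KeyError.
def Pre_convert (game_line : List String) (is_left : Bool) : Prop :=
  ∀ p ∈ game_line.take (game_line.length / 10 * 10), p ∈ validKeys is_left

instance (game_line : List String) (is_left : Bool) : Decidable (Pre_convert game_line is_left) := by
  unfold Pre_convert; infer_instance

def pvWitness_convert : List String × Bool :=
  (["A", "B", "C", "D", "E", "F", "G", "H", "I", "J", "M"], true)

def Spec_convert (game_line : List String) (is_left : Bool) (out : List (List Int)) : Prop := out = convert_alt game_line is_left
instance (game_line : List String) (is_left : Bool) (out : List (List Int)) : Decidable (Spec_convert game_line is_left out) := by unfold Spec_convert; infer_instance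

-- ===== CLAIM (what is proved, stated in full; the proofs are below) =====
def Claim_equal_convert : Prop := ∀ (game_line : List String) (is_left : Bool), Dom_convert game_line is_left → Pre_convert game_line is_left → Spec_convert game_line is_left (convert game_line is_left)

-- ===== LEMMAS AND PROOFS =====

-- the value A's loop appends for a piece
def aval (is_left : Bool) (piece : String) : Int :=
  if piece == "A" then 0
  else (if is_left then convertLetterToNumLeft piece else convertLetterToNumRight piece).getD 0

-- reference chunking: complete rows of 10, partial tail discarded
def chunk10 (l : List Int) : List (List Int) :=
  if 10 ≤ l.length then l.take 10 :: chunk10 (l.drop 10) else []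
termination_by l.length
decreasing_by simp; omega

lemma chunk10_short (l : List Int) (h : l.length < 10) : chunk10 l = [] := by
  rw [chunk10]; simp [Nat.not_le.mpr h]

lemma chunk10_long (l : List Int) (h : 10 ≤ l.length) :
    chunk10 l = l.take 10 :: chunk10 (l.drop 10) := by
  rw [chunk10]; simp [h]

lemma valid_val (is_left : Bool) (p : String) (h : p ∈ validKeys is_left) :
    aval is_left p = ((if is_left then leftMap else rightMap).get? p).getD 0 := by
  cases is_left <;> simp [validKeys] at h <;>
    rcases h with rfl | rfl | rfl | rfl | rfl | rfl | rfl | rfl | rfl | rfl | rfl | rfl | rfl <;>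
    decide

lemma A_loop (is_left : Bool) : ∀ (gl : List String) (arr : List (List Int))
    (temp : List Int) (i : Nat), i % 10 = temp.length →
    (gl.foldl (convertStep is_left) (arr, temp, i)).1 =
      arr ++ chunk10 (temp ++ gl.map (aval is_left)) := by
  intro gl
  induction gl with
  | nil =>
    intro arr temp i h
    have hlt : temp.length < 10 := by omega
    simp [chunk10_short temp hlt]
  | cons p rest ih =>
    intro arr temp i h
    have hstep : convertStep is_left (arr, temp, i) p =
        if (i + 1) % 10 == 0 then (arr ++ [temp ++ [aval is_left p]], [], i + 1)
        else (arr, temp ++ [aval is_left p], i + 1) := by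
      simp [convertStep, aval]
    by_cases h10 : (i + 1) % 10 = 0
    · have hlen : (temp ++ [aval is_left p]).length = 10 := by
        simp; omega
      rw [List.foldl_cons, hstep, if_pos (by simp [h10])]
      rw [ih (arr ++ [temp ++ [aval is_left p]]) [] (i + 1) (by simp [h10])]
      have hre : temp ++ (p :: rest).map (aval is_left) =
          (temp ++ [aval is_left p]) ++ rest.map (aval is_left) := by simp
      rw [hre, chunk10_long ((temp ++ [aval is_left p]) ++ rest.map (aval is_left))
            (by rw [List.length_append, hlen]; omega)]
      rw [List.take_append_of_le_length (le_of_eq hlen.symm),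
          List.drop_append_of_le_length (le_of_eq hlen.symm)]
      rw [List.take_of_length_le (le_of_eq hlen), List.drop_eq_nil_of_le (le_of_eq hlen)]
      simp
    · rw [List.foldl_cons, hstep]
      rw [if_neg (by simpa using h10)]
      rw [ih arr (temp ++ [aval is_left p]) (i + 1) (by simp; omega)]
      simp

lemma pre_head (gl : List String) (is_left : Bool) (hlen : 10 ≤ gl.length)
    (hp : Pre_convert gl is_left) : ∀ p ∈ gl.take 10, p ∈ validKeys is_left := by
  intro p hmem
  apply hp
  have hk : 10 ≤ gl.length / 10 * 10 := by omega
  have : gl.take 10 = (gl.take (gl.length / 10 * 10)).take 10 := by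
    rw [List.take_take]; congr 1; omega
  rw [this] at hmem
  exact List.mem_of_mem_take hmem

lemma pre_tail (gl : List String) (is_left : Bool) (hlen : 10 ≤ gl.length)
    (hp : Pre_convert gl is_left) : Pre_convert (gl.drop 10) is_left := by
  intro p hmem
  apply hp
  have hk : (gl.drop 10).length / 10 * 10 = gl.length / 10 * 10 - 10 := by
    simp; omega
  rw [hk] at hmem
  have hsplit : gl.take (gl.length / 10 * 10) =
      gl.take 10 ++ (gl.drop 10).take (gl.length / 10 * 10 - 10) := by
    rw [← List.take_add]
    congr 1
    omega
  rw [hsplit]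
  exact List.mem_append_right _ hmem

lemma B_chunks (is_left : Bool) : ∀ (n : Nat) (gl : List String), gl.length ≤ n →
    Pre_convert gl is_left → convert_alt gl is_left = chunk10 (gl.map (aval is_left)) := by
  intro n
  induction n with
  | zero =>
    intro gl hn _
    have : gl = [] := List.eq_nil_of_length_eq_zero (by omega)
    subst this
    simp [convert_alt, chunk10_short]
  | succ n ih =>
    intro gl hn hp
    by_cases hlen : 10 ≤ gl.length
    · rw [convert_alt, if_pos hlen, chunk10_long _ (by simp [hlen])]
      rw [← List.map_take]
      congr 1
      · exact (List.map_congr_left (fun p hmem =>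
          (valid_val is_left p (pre_head gl is_left hlen hp p hmem)).symm))
      · rw [ih (gl.drop 10) (by simp; omega) (pre_tail gl is_left hlen hp)]
        rw [List.map_drop]
    · rw [convert_alt, if_neg hlen, chunk10_short _ (by simp; omega)]

-- ===== VERDICT (by name: the statement is the Claim_ definition above) =====
theorem convert_spec : Claim_equal_convert := by
  intro gl is_left _ hp
  unfold Spec_convert convert
  rw [A_loop is_left gl [] [] 0 rfl, B_chunks is_left gl.length gl le_rfl hp]
  simp
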